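-- pv_equiv track=rewrite | github.com/CutieillFusion/swag | dataloader.py | _has_consecutive_noops
-- ===== SOURCE A (Python) =====
-- def _has_consecutive_noops(seq, label_val, threshold):
--     count = 0
--     for label in seq:
--         if label == label_val:
--             count += 1
--             if count >= threshold:
--                 return True
--         else:
--             count = 0
--     return False
-- ===== SOURCE B (Python) =====
-- def _has_consecutive_noops(seq, label_val, threshold):
--     # Run-length encode the sequence, then look for a matching run long enough.
--     if not seq:
--         runs = []
--     else:
--         runs = []
--         k, n = seq[0], 1
--         for y in seq[1:]:
--             if y == k:
--                 n += 1
--             else: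
--                 runs.append((k, n))
--                 k, n = y, 1
--         runs.append((k, n))
--     return any(key == label_val and length >= threshold for key, length in runs)
-- ===== Notes on version B (the rewrite author's own statement) =====
-- stated objective: alternative
-- what changed: Replaces A's rolling counter with early return by a run-length encoding of the sequence followed by an any() scan over the runs.
import Mathlib
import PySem

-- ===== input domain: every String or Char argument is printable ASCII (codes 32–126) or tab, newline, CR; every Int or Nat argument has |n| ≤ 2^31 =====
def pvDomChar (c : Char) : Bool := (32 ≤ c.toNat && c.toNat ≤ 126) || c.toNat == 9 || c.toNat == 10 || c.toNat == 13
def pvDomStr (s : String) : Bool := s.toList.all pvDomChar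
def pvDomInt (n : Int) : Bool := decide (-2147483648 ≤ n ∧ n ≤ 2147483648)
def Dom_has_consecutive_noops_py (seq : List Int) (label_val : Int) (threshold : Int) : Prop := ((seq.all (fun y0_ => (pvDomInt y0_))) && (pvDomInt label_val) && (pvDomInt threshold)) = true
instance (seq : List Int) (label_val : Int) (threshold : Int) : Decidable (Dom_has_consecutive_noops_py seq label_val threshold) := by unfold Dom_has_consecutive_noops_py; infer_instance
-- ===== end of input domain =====

-- B replaces A's rolling counter (with early return) by a run-length encoding
-- of the sequence followed by an any-scan over the runs (objective: alternative).

-- ===== PORT A =====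
-- A's for-loop with accumulator `count` and early return.
def aLoop (label_val threshold : Int) : List Int → Int → Bool
  | [], _ => false
  | label :: rest, count =>
    if label == label_val then
      if count + 1 ≥ threshold then true
      else aLoop label_val threshold rest (count + 1)
    else aLoop label_val threshold rest 0

def has_consecutive_noops_py (seq : List Int) (label_val : Int) (threshold : Int) : Bool :=
  aLoop label_val threshold seq 0

-- ===== PORT B =====
-- B's inner loop: current run (k, n), emitting completed runs.
def runLoop : Int → Int → List Int → List (Int × Int)
  | k, n, [] => [(k, n)]
  | k, n, y :: ys => if y == k then runLoop k (n + 1) ys else (k, n) :: runLoop y 1 ys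

def runLengthEncode : List Int → List (Int × Int)
  | [] => []
  | x :: xs => runLoop x 1 xs

def has_consecutive_noops_py_alt (seq : List Int) (label_val : Int) (threshold : Int) : Bool :=
  (runLengthEncode seq).any (fun p => p.1 == label_val && decide (p.2 ≥ threshold))

-- ===== PRECONDITION & SPEC =====
def Spec_has_consecutive_noops_py (seq : List Int) (label_val : Int) (threshold : Int) (out : Bool) : Prop := out = has_consecutive_noops_py_alt seq label_val threshold
instance (seq : List Int) (label_val : Int) (threshold : Int) (out : Bool) : Decidable (Spec_has_consecutive_noops_py seq label_val threshold out) := by unfold Spec_has_consecutive_noops_py; infer_instance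

-- ===== CLAIM (what is proved, stated in full; the proofs are below) =====
def Claim_equal_has_consecutive_noops_py : Prop := ∀ (seq : List Int) (label_val : Int) (threshold : Int), Dom_has_consecutive_noops_py seq label_val threshold → Spec_has_consecutive_noops_py seq label_val threshold (has_consecutive_noops_py seq label_val threshold)

-- ===== LEMMAS AND PROOFS =====

-- Invariant: B's any-scan over the remaining runs (current run (k, n)) agrees with
-- "the current run already suffices, or A's loop continues with the matching count".
lemma runLoop_eq (label_val threshold : Int) :
    ∀ (ys : List Int) (k n : Int),
      (runLoop k n ys).any (fun p => p.1 == label_val && decide (p.2 ≥ threshold))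
      = (((k == label_val) && decide (threshold ≤ n))
          || aLoop label_val threshold ys (if k == label_val then n else 0)) := by
  intro ys
  induction ys with
  | nil =>
    intro k n
    simp [runLoop, aLoop]
  | cons y ys ih =>
    intro k n
    by_cases hyk : y = k
    · subst hyk
      by_cases hkl : y = label_val
      · subst hkl
        simp only [runLoop, aLoop, beq_self_eq_true, if_true, ih]
        by_cases h1 : threshold ≤ y + 1 <;> by_cases h2 : threshold ≤ y + 1 - 0 <;>
          simp_all <;> omega
      · have h : (y == label_val) = false := by simp [hkl]
        simp only [runLoop, aLoop, beq_self_eq_true, if_true, ih, h]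
        simp
    · have hne : (y == k) = false := by simp [hyk]
      rw [runLoop, if_neg (by simp [hyk]), List.any_cons, ih y 1]
      by_cases hyl : y = label_val
      · have hkl : k ≠ label_val := fun h => hyk (hyl.trans h.symm)
        subst hyl
        simp only [aLoop, beq_self_eq_true, if_true]
        by_cases h1 : threshold ≤ (0:Int) + 1 <;> simp_all
      · have h : (y == label_val) = false := by simp [hyl]
        simp [aLoop, h]

-- ===== VERDICT (by name: the statement is the Claim_ definition above) =====
theorem has_consecutive_noops_py_spec : Claim_equal_has_consecutive_noops_py := by
  intro seq label_val threshold _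
  unfold Spec_has_consecutive_noops_py has_consecutive_noops_py has_consecutive_noops_py_alt
  cases seq with
  | nil => simp [aLoop, runLengthEncode]
  | cons x xs =>
    rw [runLengthEncode, runLoop_eq]
    by_cases hxl : x = label_val
    · subst hxl
      simp only [aLoop, beq_self_eq_true, if_true]
      by_cases h1 : threshold ≤ (0:Int) + 1 <;> simp_all
    · simp [aLoop, hxl]
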